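-- pv_equiv track=rewrite | github.com/isekovanic/advent-of-code | 2025/Day 6/p2.py | _solve
-- ===== SOURCE A (Python) =====
-- from itertools import zip_longest
--
-- def _solve(problem_input):
--     # replace all newlines with empty spaces - it won't really change anything
--     # while zipping later and it takes care of lower length lines which we want
--     # to avoid
--     problem_input = [x.replace('\n', ' ') for x in problem_input]
--     # the last line (containing the operations) is naturally shorter as the operands
--     # are left padded; while there are many smarter ways to solve this, hacking
--     # it by padding it with a ton of empty spaces at the end (which we'll anyway strip
--     # away) does the trick
--     problem_input[len(problem_input) - 1] += ' ' * 100
--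
--     result = 0
--     intermediary_result = 0
--     current_operation = ''
--
--     # we transpose the entire input intentionally in order to get exactly what we need,
--     # while making sure that we count and parse all instances of operands
--     for line in [''.join(item) for item in zip_longest(*problem_input, fillvalue='')]:
--         *val, operation = line
--         if operation in '*+':
--             result += intermediary_result
--             intermediary_result = 0 if operation == '+' else 1
--             current_operation = operation
--
--         joined = ''.join(val).strip()
--         if len(joined) == 0:
--             continue
--         int_val = int(joined)
--         if current_operation == '*':
--             intermediary_result *= int_val
--         else:
--             intermediary_result += int_val
--
--     # we add the last intermediary_result as the string ended before we have a chance to count it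
--     return result + intermediary_result
-- ===== SOURCE B (Python) =====
-- def _seg(op, nums):
--     # segment value: product for '*', sum otherwise (covers the implicit leading segment)
--     if op == '*':
--         p = 1
--         for v in nums:
--             p *= v
--         return p
--     return sum(nums)
--
-- def _solve(problem_input):
--     rows = [r.replace('\n', ' ') for r in problem_input]
--     rows[-1] += ' ' * 100
--     width = max((len(r) for r in rows), default=0)
--     # row-major sweep (no transposition): per column keep the lowest character
--     # seen so far (the operator slot) and the characters above it (the digits)
--     bottom = [None] * width
--     body = [''] * width
--     for r in rows:
--         for i, ch in enumerate(r):
--             if bottom[i] is not None: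
--                 body[i] += bottom[i]
--             bottom[i] = ch
--     # left-to-right evaluation with deferred segment values
--     total, op, nums = 0, '', []
--     for i in range(width):
--         if bottom[i] in ('*', '+'):
--             total += _seg(op, nums)
--             op, nums = bottom[i], []
--         s = body[i].strip()
--         if s:
--             nums.append(int(s))
--     return total + _seg(op, nums)
-- ===== Notes on version B (the rewrite author's own statement) =====
-- stated objective: alternative
-- what changed: Replaces A's zip_longest column transpose and eagerly-updated running accumulator by a row-major sweep that fills two parallel per-column arrays (operator slot and digit body) while scanning each input line left to right, followed by a left-to-right evaluation that defers each segment's value (product for '*', sum otherwise) until its boundary instead of seeding identities and updating a running intermediary.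
import Mathlib
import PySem

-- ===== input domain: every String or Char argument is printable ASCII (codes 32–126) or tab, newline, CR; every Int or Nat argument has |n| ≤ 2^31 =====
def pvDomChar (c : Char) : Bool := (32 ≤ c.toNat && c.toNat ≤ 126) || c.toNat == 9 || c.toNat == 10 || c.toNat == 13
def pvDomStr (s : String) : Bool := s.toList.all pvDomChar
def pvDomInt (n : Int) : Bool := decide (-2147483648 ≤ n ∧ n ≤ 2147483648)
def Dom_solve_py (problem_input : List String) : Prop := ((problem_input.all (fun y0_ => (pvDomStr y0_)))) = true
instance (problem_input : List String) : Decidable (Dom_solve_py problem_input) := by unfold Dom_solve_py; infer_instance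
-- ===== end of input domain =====

-- B replaces A's zip_longest transpose + running accumulator by a row-major sweep filling
-- per-column operator/body arrays, then a deferred-segment evaluation; same cost, alternative
-- decomposition. Return-value equivalence only (neither observably mutates its argument).


-- ===== PORT A =====

-- termination helper for pvZipJoin (cited by its decreasing_by)
theorem pvZipJoin_measure (ls : List (List Char)) (hne : ¬ ls.all (fun l => l.isEmpty) = true) :
    ((ls.map (fun l => l.tail)).map List.length).sum < (ls.map List.length).sum := by
  induction ls with
  | nil => simp at hne
  | cons a t ih =>
    simp only [List.all_cons, Bool.and_eq_true, not_and] at hne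
    by_cases ha : a.isEmpty = true
    · have := ih (hne ha)
      simp only [List.map_cons, List.sum_cons]
      have : a.tail.length ≤ a.length := by cases a <;> simp
      omega
    · have h1 : a.tail.length < a.length := by
        cases a with
        | nil => simp at ha
        | cons x xs => simp
      have h2 : ∀ (u : List (List Char)),
          ((u.map (fun l => l.tail)).map List.length).sum ≤ (u.map List.length).sum := by
        intro u
        induction u with
        | nil => simp
        | cons b r ihr =>
          simp only [List.map_cons, List.sum_cons]
          have : b.tail.length ≤ b.length := by cases b <;> simp
          omega
      have := h2 t
      simp only [List.map_cons, List.sum_cons]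
      omega

-- hand-port of "[''.join(item) for item in zip_longest(*lines, fillvalue='')]":
-- the '' fill characters vanish in the join, so each produced column is exactly the
-- current head of every still-nonempty line; exact for this construct.
def pvZipJoin (ls : List (List Char)) : List (List Char) :=
  if _h : ls.all (fun l => l.isEmpty) = true then []
  else ls.filterMap (fun l => l.head?) :: pvZipJoin (ls.map (fun l => l.tail))
termination_by (ls.map List.length).sum
decreasing_by simpa using pvZipJoin_measure ls _h

-- one iteration of A's loop; the state is (result, intermediary_result, current_operation),
-- current_operation '' modelled as ' ' (never equal to '*'/'+')
def pvStepA (acc : Int × Int × Char) (col : List Char) : Int × Int × Char :=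
  let val := col.dropLast
  let operation := col.getLastD ' '   -- columns are never empty; default unreachable
  let acc1 :=
    if operation = '*' ∨ operation = '+' then
      (acc.1 + acc.2.1, if operation = '+' then (0 : Int) else 1, operation)
    else acc
  let joined := PySem.Chars.strip val
  if joined = [] then acc1
  else
    match PySem.Int.ofChars? joined with
    | none => acc1   -- int() raises ValueError here; excluded by Pre_
    | some n =>
      if acc1.2.2 = '*' then (acc1.1, acc1.2.1 * n, acc1.2.2)
      else (acc1.1, acc1.2.1 + n, acc1.2.2)

def solve_py (problem_input : List String) : Int :=
  let lines := problem_input.map (fun x => (PySem.Str.replace x "\n" " ").toList)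
  match lines.getLast? with
  | none => 0   -- problem_input[-1] raises IndexError on []; excluded by Pre_
  | some last =>
    let lines2 := lines.dropLast ++ [last ++ List.replicate 100 ' ']
    let fin := (pvZipJoin lines2).foldl pvStepA (0, 0, ' ')
    fin.1 + fin.2.1

-- ===== PORT B =====

-- "width = max((len(r) for r in rows), default=0)"
def pvWd (L : List (List Char)) : Nat := L.foldl (fun m l => max m l.length) 0

-- B's _seg: product with identity 1 for '*', sum otherwise
def pvSeg (op : Char) (nums : List Int) : Int :=
  if op = '*' then nums.foldl (· * ·) 1 else nums.sum

-- body of B's inner row loop: "if bottom[i] is not None: body[i] += bottom[i]; bottom[i] = ch"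
def pvFill1 (st : List (Option Char) × List (List Char)) (i : Nat) (ch : Char) :
    List (Option Char) × List (List Char) :=
  let bd := match st.1.getD i none with
    | none => st.2
    | some c => st.2.set i ((st.2.getD i []) ++ [c])
  (st.1.set i (some ch), bd)

-- "for i, ch in enumerate(r): …" carrying the running index
def pvFillRow (k : Nat) (st : List (Option Char) × List (List Char)) :
    List Char → List (Option Char) × List (List Char)
  | [] => st
  | ch :: rest => pvFillRow (k + 1) (pvFill1 st k ch) rest

-- one iteration of B's evaluation loop; the state is (total, op, nums), op '' modelled as ' '
def pvEvalStep (acc : Int × Char × List Int) (p : Option Char × List Char) : Int × Char × List Int :=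
  let acc1 :=
    if p.1 = some '*' ∨ p.1 = some '+' then
      (acc.1 + pvSeg acc.2.1 acc.2.2, p.1.getD ' ', ([] : List Int))
    else acc
  let s := PySem.Chars.strip p.2
  if s = [] then acc1
  else
    match PySem.Int.ofChars? s with
    | none => acc1   -- int() raises ValueError here; excluded by Pre_
    | some n => (acc1.1, acc1.2.1, acc1.2.2 ++ [n])

def solve_py_alt (problem_input : List String) : Int :=
  let rows := problem_input.map (fun x => (PySem.Str.replace x "\n" " ").toList)
  match rows.getLast? with
  | none => 0   -- rows[-1] raises IndexError on []; excluded by Pre_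
  | some last =>
    let rows2 := rows.dropLast ++ [last ++ List.replicate 100 ' ']
    let W := pvWd rows2
    let fill := rows2.foldl (fun st r => pvFillRow 0 st r) (List.replicate W none, List.replicate W [])
    let fin := (fill.1.zip fill.2).foldl pvEvalStep (0, ' ', [])
    fin.1 + pvSeg fin.2.1 fin.2.2

-- ===== PRECONDITION & SPEC =====

-- the padded line list both programs work on (input view, used only by Pre_)
def pvPadded (problem_input : List String) : List (List Char) :=
  let lines := problem_input.map (fun x => (PySem.Str.replace x "\n" " ").toList)
  lines.dropLast ++ [(lines.getLastD []) ++ List.replicate 100 ' ']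

-- the lines before padding (input view, used only by Pre_)
def pvLines0 (problem_input : List String) : List (List Char) :=
  problem_input.map (fun x => (PySem.Str.replace x "\n" " ").toList)

-- Pre_ excludes exactly the inputs where Python A raises: the empty list (IndexError on
-- problem_input[-1]) and inputs with a column whose stripped value part is non-empty but
-- not an int literal (ValueError from int()).  Columns beyond the unpadded width consist
-- of padding spaces only and are stripped to empty, so only the first pvWd (pvLines0 _)
-- columns are constrained.
def Pre_solve_py (problem_input : List String) : Prop :=
  problem_input ≠ [] ∧
  ∀ i ∈ List.range (pvWd (pvLines0 problem_input)),
    PySem.Chars.strip (((pvPadded problem_input).filterMap (fun l => l[i]?)).dropLast) = [] ∨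
    (PySem.Int.ofChars? (PySem.Chars.strip
      (((pvPadded problem_input).filterMap (fun l => l[i]?)).dropLast))).isSome = true
instance (problem_input : List String) : Decidable (Pre_solve_py problem_input) := by
  unfold Pre_solve_py; infer_instance

def pvWitness_solve_py : List String := ["1", "+"]

def Spec_solve_py (problem_input : List String) (out : Int) : Prop := out = solve_py_alt problem_input
instance (problem_input : List String) (out : Int) : Decidable (Spec_solve_py problem_input out) := by
  unfold Spec_solve_py; infer_instance

-- ===== CLAIM (what is proved, stated in full; the proofs are below) =====
def Claim_equal_solve_py : Prop := ∀ (problem_input : List String), Dom_solve_py problem_input → Pre_solve_py problem_input → Spec_solve_py problem_input (solve_py problem_input)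

-- ===== LEMMAS AND PROOFS =====

-- pvWd facts (used to characterise A's transpose)
theorem pvWd_init (L : List (List Char)) (a : Nat) :
    L.foldl (fun m l => max m l.length) a = max a (pvWd L) := by
  induction L generalizing a with
  | nil => simp [pvWd]
  | cons h t ih =>
    simp only [pvWd, List.foldl_cons] at *
    rw [ih, ih (max 0 h.length)]
    omega

theorem pvWd_tail (L : List (List Char)) :
    pvWd (L.map (fun l => l.tail)) = pvWd L - 1 := by
  induction L with
  | nil => simp [pvWd]
  | cons h t ih =>
    simp only [List.map_cons, pvWd, List.foldl_cons] at *
    rw [pvWd_init, pvWd_init t]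
    rw [pvWd_init, pvWd_init t] at ih
    have : h.tail.length = h.length - 1 := by cases h <;> simp
    omega

theorem pvWd_eq_zero (L : List (List Char)) (h : L.all (fun l => l.isEmpty) = true) :
    pvWd L = 0 := by
  induction L with
  | nil => simp [pvWd]
  | cons a t ih =>
    simp only [List.all_cons, Bool.and_eq_true, List.isEmpty_iff] at h
    simp only [pvWd, List.foldl_cons]
    rw [pvWd_init]
    have := ih h.2
    simp [h.1, this]

theorem pvWd_pos (L : List (List Char)) (h : ¬ L.all (fun l => l.isEmpty) = true) :
    0 < pvWd L := by
  simp only [List.all_eq_true, not_forall] at h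
  obtain ⟨l, hl, hne⟩ := h
  have hlen := (PySem.List.le_foldl_max_nat L List.length 0).2 l hl
  have : l ≠ [] := by simpa [List.isEmpty_iff] using hne
  have : 0 < l.length := List.length_pos_iff.mpr this
  unfold pvWd
  omega

-- A's transpose equals the index-based column view
theorem pvZipJoin_eq_aux (n : Nat) : ∀ (L : List (List Char)), pvWd L = n →
    pvZipJoin L = (List.range (pvWd L)).map (fun i => L.filterMap (fun l => l[i]?)) := by
  induction n with
  | zero =>
    intro L hw
    rw [pvZipJoin]
    have hall : L.all (fun l => l.isEmpty) = true := by
      by_contra hc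
      have := pvWd_pos L hc
      omega
    simp [hall, hw]
  | succ n ih =>
    intro L hw
    have hnall : ¬ L.all (fun l => l.isEmpty) = true := by
      intro hc
      have := pvWd_eq_zero L hc
      omega
    rw [pvZipJoin, dif_neg hnall]
    have htail : pvWd (L.map (fun l => l.tail)) = n := by
      rw [pvWd_tail]; omega
    rw [ih _ htail, htail, hw, List.range_succ_eq_map]
    simp only [List.map_cons, List.map_map]
    congr 1
    · exact List.filterMap_congr (fun l _ => by cases l <;> simp)
    · refine List.map_congr_left (fun i _ => ?_)
      rw [List.filterMap_map]
      exact List.filterMap_congr (fun l _ => by cases l <;> simp)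

theorem pvZipJoin_eq (L : List (List Char)) :
    pvZipJoin L = (List.range (pvWd L)).map (fun i => L.filterMap (fun l => l[i]?)) :=
  pvZipJoin_eq_aux (pvWd L) L rfl

-- the pair summary of a column A's step really consumes
def pvPack (col : List Char) : Char × Option Int :=
  (col.getLastD ' ',
   if PySem.Chars.strip col.dropLast = [] then none
   else PySem.Int.ofChars? (PySem.Chars.strip col.dropLast))

-- A's step on pair summaries
def pvStepP (acc : Int × Int × Char) (cn : Char × Option Int) : Int × Int × Char :=
  let acc1 :=
    if cn.1 = '*' ∨ cn.1 = '+' then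
      (acc.1 + acc.2.1, if cn.1 = '+' then (0 : Int) else 1, cn.1)
    else acc
  match cn.2 with
  | none => acc1
  | some n =>
    if acc1.2.2 = '*' then (acc1.1, acc1.2.1 * n, acc1.2.2)
    else (acc1.1, acc1.2.1 + n, acc1.2.2)

theorem pvStepA_eq_pack (acc : Int × Int × Char) (col : List Char) :
    pvStepA acc col = pvStepP acc (pvPack col) := by
  unfold pvStepA pvStepP pvPack
  by_cases hj : PySem.Chars.strip col.dropLast = [] <;>
    cases hv : PySem.Int.ofChars? (PySem.Chars.strip col.dropLast) <;> simp [hj, hv]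

-- lengths are invariant under the row-major fill
theorem pvFill1_len (st : List (Option Char) × List (List Char)) (i : Nat) (ch : Char) :
    (pvFill1 st i ch).1.length = st.1.length ∧ (pvFill1 st i ch).2.length = st.2.length := by
  unfold pvFill1
  cases st.1.getD i none <;> simp

theorem pvFillRow_len (r : List Char) : ∀ (k : Nat) (st : List (Option Char) × List (List Char)),
    (pvFillRow k st r).1.length = st.1.length ∧ (pvFillRow k st r).2.length = st.2.length := by
  induction r with
  | nil => intro k st; simp [pvFillRow]
  | cons ch rest ih =>
    intro k st
    have h1 := pvFill1_len st k ch
    have h2 := ih (k + 1) (pvFill1 st k ch)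
    simp only [pvFillRow] at *
    omega

-- what one row does to the entry of column i
theorem pvFillRow_get (r : List Char) : ∀ (k i : Nat) (bo : List (Option Char))
    (bd : List (List Char)) (b : Option Char) (d : List Char),
    bo[i]? = some b → bd[i]? = some d →
    (pvFillRow k (bo, bd) r).1[i]? =
      some (if k ≤ i ∧ i < k + r.length then some (r.getD (i - k) ' ') else b) ∧
    (pvFillRow k (bo, bd) r).2[i]? =
      some (if k ≤ i ∧ i < k + r.length then d ++ b.toList else d) := by
  induction r with
  | nil =>
    intro k i bo bd b d hb hd
    have hc : ¬ (k ≤ i ∧ i < k + ([] : List Char).length) := by simp only [List.length_nil]; omega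
    rw [if_neg hc, if_neg hc]
    exact ⟨hb, hd⟩
  | cons ch rest ih =>
    intro k i bo bd b d hb hd
    simp only [pvFillRow]
    by_cases hik : i = k
    · subst hik
      have hlt1 : i < bo.length := by
        by_contra hc
        rw [List.getElem?_eq_none (by omega)] at hb; exact absurd hb (by simp)
      have hlt2 : i < bd.length := by
        by_contra hc
        rw [List.getElem?_eq_none (by omega)] at hd; exact absurd hd (by simp)
      have hst1 : (pvFill1 (bo, bd) i ch).1[i]? = some (some ch) := by
        simp [pvFill1, List.getElem?_set_self hlt1]
      have hst2 : (pvFill1 (bo, bd) i ch).2[i]? = some (d ++ b.toList) := by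
        simp only [pvFill1]
        have hgd : bo.getD i none = b := by rw [List.getD_eq_getElem?_getD, hb]; rfl
        rw [hgd]
        cases b with
        | none => simpa using hd
        | some c =>
          have hdd : bd.getD i [] = d := by rw [List.getD_eq_getElem?_getD, hd]; rfl
          rw [hdd]
          simp [List.getElem?_set_self hlt2]
      have hrec := ih (i + 1) i _ _ _ _ hst1 hst2
      have hcond : ¬ (i + 1 ≤ i ∧ i < i + 1 + rest.length) := by omega
      rw [if_neg hcond, if_neg hcond] at hrec
      have hcond2 : i ≤ i ∧ i < i + (ch :: rest).length := by simp
      rw [if_pos hcond2, if_pos hcond2]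
      simpa using hrec
    · have hb' : (pvFill1 (bo, bd) k ch).1[i]? = some b := by
        simp only [pvFill1]
        rw [List.getElem?_set_ne (by omega), hb]
      have hd' : (pvFill1 (bo, bd) k ch).2[i]? = some d := by
        simp only [pvFill1]
        cases bo.getD k none with
        | none => exact hd
        | some c => rw [List.getElem?_set_ne (by omega), hd]
      have hrec := ih (k + 1) i _ _ _ _ hb' hd'
      by_cases hc : k ≤ i ∧ i < k + (ch :: rest).length
      · have hc' : k + 1 ≤ i ∧ i < k + 1 + rest.length := by
          simp only [List.length_cons] at hc; omega
        rw [if_pos hc', if_pos hc'] at hrec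
        rw [if_pos hc, if_pos hc]
        have hidx : i - k = (i - (k + 1)) + 1 := by omega
        rw [hidx, List.getD_cons_succ]
        exact hrec
      · have hc' : ¬ (k + 1 ≤ i ∧ i < k + 1 + rest.length) := by
          simp only [List.length_cons] at hc; omega
        rw [if_neg hc', if_neg hc'] at hrec
        rw [if_neg hc, if_neg hc]
        exact hrec

-- l.dropLast ++ l.getLast?.toList = l
theorem pvDropLast_getLast (l : List Char) : l.dropLast ++ l.getLast?.toList = l := by
  cases h : l.getLast? with
  | none => simp [List.getLast?_eq_none_iff.mp h]
  | some a => simpa using List.dropLast_append_getLast? a h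

-- the fold over all rows reconstructs the column view
theorem pvFillFold (L : List (List Char)) : ∀ (bo : List (Option Char)) (bd : List (List Char))
    (i : Nat) (ci : List Char),
    bo[i]? = some ci.getLast? → bd[i]? = some ci.dropLast →
    (L.foldl (fun st r => pvFillRow 0 st r) (bo, bd)).1[i]? =
      some ((ci ++ L.filterMap (fun l => l[i]?)).getLast?) ∧
    (L.foldl (fun st r => pvFillRow 0 st r) (bo, bd)).2[i]? =
      some ((ci ++ L.filterMap (fun l => l[i]?)).dropLast) := by
  induction L with
  | nil =>
    intro bo bd i ci hb hd
    simpa using ⟨hb, hd⟩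
  | cons r L' ih =>
    intro bo bd i ci hb hd
    simp only [List.foldl_cons]
    have hrow := pvFillRow_get r 0 i bo bd _ _ hb hd
    by_cases hi : i < r.length
    · have hc : 0 ≤ i ∧ i < 0 + r.length := ⟨Nat.zero_le i, by omega⟩
      rw [if_pos hc, if_pos hc] at hrow
      have hgd : r.getD (i - 0) ' ' = r[i] := by
        simp [List.getD_eq_getElem?_getD, List.getElem?_eq_getElem hi]
      have hb' : (pvFillRow 0 (bo, bd) r).1[i]? = some ((ci ++ [r[i]]).getLast?) := by
        rw [hrow.1, hgd, List.getLast?_concat]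
      have hd' : (pvFillRow 0 (bo, bd) r).2[i]? = some ((ci ++ [r[i]]).dropLast) := by
        rw [hrow.2, List.dropLast_concat, pvDropLast_getLast]
      have hri : r[i]? = some r[i] := List.getElem?_eq_getElem hi
      rw [List.filterMap_cons, hri]
      have := ih _ _ i (ci ++ [r[i]]) hb' hd'
      simpa using this
    · have hc : ¬ (0 ≤ i ∧ i < 0 + r.length) := by omega
      rw [if_neg hc, if_neg hc] at hrow
      have hri : r[i]? = none := List.getElem?_eq_none (by omega)
      rw [List.filterMap_cons, hri]
      have := ih _ _ i ci hrow.1 hrow.2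
      simpa using this

-- pvSeg over an appended element
theorem pvSeg_append (op : Char) (nums : List Int) (n : Int) :
    pvSeg op (nums ++ [n]) = if op = '*' then pvSeg op nums * n else pvSeg op nums + n := by
  unfold pvSeg
  by_cases h : op = '*' <;> simp [h, List.foldl_append]

-- one step of A's fold tracked against one step of B's deferred-segment fold
theorem pvRelStep (t : Int) (op : Char) (nums : List Int) (col : List Char) :
    pvStepP (t, pvSeg op nums, op) (pvPack col) =
      ((pvEvalStep (t, op, nums) (col.getLast?, col.dropLast)).1,
       pvSeg (pvEvalStep (t, op, nums) (col.getLast?, col.dropLast)).2.1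
             (pvEvalStep (t, op, nums) (col.getLast?, col.dropLast)).2.2,
       (pvEvalStep (t, op, nums) (col.getLast?, col.dropLast)).2.1) := by
  unfold pvStepP pvEvalStep pvPack
  have hlast : col.getLastD ' ' = (col.getLast?).getD ' ' := List.getLastD_eq_getLast?
  rw [hlast]
  cases hl : col.getLast? with
  | none =>
    have hop : ¬ ((' ' : Char) = '*' ∨ (' ' : Char) = '+') := by decide
    simp only [Option.getD_none]
    by_cases hs : PySem.Chars.strip col.dropLast = []
    · simp [hs]
    · cases hv : PySem.Int.ofChars? (PySem.Chars.strip col.dropLast) with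
      | none => simp [hs]
      | some n =>
        simp only [hs, if_neg hop, if_neg (by simp : ¬ (none = some '*' ∨ none = some '+'))]
        by_cases ho : op = '*' <;> simp [ho, pvSeg_append]
  | some x =>
    by_cases hx : x = '*' ∨ x = '+'
    · have hx' : (some x = some '*' ∨ some x = some '+') := by
        rcases hx with h | h <;> simp [h]
      have hid : (if x = '+' then (0:Int) else 1) = pvSeg x [] := by
        rcases hx with h | h <;> simp [h, pvSeg]
      by_cases hs : PySem.Chars.strip col.dropLast = []
      · simp only [if_pos hx, if_pos hx', if_pos hs, Option.getD_some]
        exact congrArg (fun z : Int => (t + pvSeg op nums, z, x)) hid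
      · cases hv : PySem.Int.ofChars? (PySem.Chars.strip col.dropLast) with
        | none => simp only [if_pos hx, if_pos hx', if_neg hs, hv, Option.getD_some]
                  exact congrArg (fun z : Int => (t + pvSeg op nums, z, x)) hid
        | some n =>
          simp only [if_pos hx, if_pos hx', if_neg hs, hv, Option.getD_some]
          rcases hx with h | h <;> simp [h, pvSeg]
    · have hx' : ¬ (some x = some '*' ∨ some x = some '+') := by
        simpa using hx
      by_cases hs : PySem.Chars.strip col.dropLast = []
      · simp [hx, hs]
      · cases hv : PySem.Int.ofChars? (PySem.Chars.strip col.dropLast) with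
        | none => simp [hx, hs, hv]
        | some n =>
          simp only [if_neg hx', if_neg hs, hv]
          by_cases ho : op = '*' <;> simp [ho, hx, pvSeg_append]

theorem pvFoldRel (cols : List (List Char)) : ∀ (t : Int) (op : Char) (nums : List Int),
    cols.foldl (fun a col => pvStepP a (pvPack col)) (t, pvSeg op nums, op) =
      ((cols.foldl (fun a col => pvEvalStep a (col.getLast?, col.dropLast)) (t, op, nums)).1,
       pvSeg (cols.foldl (fun a col => pvEvalStep a (col.getLast?, col.dropLast)) (t, op, nums)).2.1
             (cols.foldl (fun a col => pvEvalStep a (col.getLast?, col.dropLast)) (t, op, nums)).2.2,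
       (cols.foldl (fun a col => pvEvalStep a (col.getLast?, col.dropLast)) (t, op, nums)).2.1) := by
  induction cols with
  | nil => intro t op nums; rfl
  | cons c rest ih =>
    intro t op nums
    simp only [List.foldl_cons]
    rw [pvRelStep]
    exact ih _ _ _

theorem pvFillFold_len (L : List (List Char)) : ∀ (st : List (Option Char) × List (List Char)),
    (L.foldl (fun st r => pvFillRow 0 st r) st).1.length = st.1.length ∧
    (L.foldl (fun st r => pvFillRow 0 st r) st).2.length = st.2.length := by
  induction L with
  | nil => intro st; simp
  | cons r L' ih =>
    intro st
    have h1 := pvFillRow_len r 0 st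
    have h2 := ih (pvFillRow 0 st r)
    simp only [List.foldl_cons] at *
    omega

theorem pvZipEq (L : List (List Char)) :
    ((L.foldl (fun st r => pvFillRow 0 st r)
        (List.replicate (pvWd L) none, List.replicate (pvWd L) [])).1.zip
     (L.foldl (fun st r => pvFillRow 0 st r)
        (List.replicate (pvWd L) none, List.replicate (pvWd L) [])).2) =
    ((List.range (pvWd L)).map (fun i => L.filterMap (fun l => l[i]?))).map
      (fun col => (col.getLast?, col.dropLast)) := by
  set W := pvWd L with hW
  set fill := L.foldl (fun st r => pvFillRow 0 st r)
      (List.replicate W (none : Option Char), List.replicate W ([] : List Char)) with hfill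
  have hl1 : fill.1.length = W := by
    rw [hfill]
    simpa using (pvFillFold_len L (List.replicate W (none : Option Char), List.replicate W ([] : List Char))).1
  have hl2 : fill.2.length = W := by
    rw [hfill]
    simpa using (pvFillFold_len L (List.replicate W (none : Option Char), List.replicate W ([] : List Char))).2
  apply List.ext_getElem?
  intro i
  by_cases hi : i < W
  · have hcol := pvFillFold L (List.replicate W none) (List.replicate W []) i []
      (by simp [hi]) (by simp [hi])
    have hzip : (fill.1.zip fill.2)[i]? =
        some ((L.filterMap (fun l => l[i]?)).getLast?, (L.filterMap (fun l => l[i]?)).dropLast) := by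
      apply List.getElem?_zip_eq_some.mpr
      constructor
      · simpa using hcol.1
      · simpa using hcol.2
    rw [hzip, List.getElem?_map, List.getElem?_map, List.getElem?_range hi]
    rfl
  · rw [List.getElem?_eq_none, List.getElem?_eq_none]
    · simp [hi |> Nat.not_lt.mp]
    · rw [List.length_zip]
      omega

-- ===== VERDICT (by name: the statement is the Claim_ definition above) =====
theorem solve_py_spec : Claim_equal_solve_py := by
  intro pi hdom hpre
  unfold Spec_solve_py solve_py solve_py_alt
  cases h : (pi.map (fun x => (PySem.Str.replace x "\n" " ").toList)).getLast? with
  | none =>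
    exact absurd (List.map_eq_nil_iff.mp (List.getLast?_eq_none_iff.mp h)) hpre.1
  | some last =>
    simp only [h]
    set L := (pi.map (fun x => (PySem.Str.replace x "\n" " ").toList)).dropLast ++
      [last ++ List.replicate 100 ' '] with hL
    -- A's transpose becomes the index-based column view
    rw [pvZipJoin_eq]
    rw [show ∀ (cols : List (List Char)) (init : Int × Int × Char),
          cols.foldl pvStepA init = cols.foldl (fun acc col => pvStepP acc (pvPack col)) init
        from fun cols init => PySem.List.foldl_congr_mem cols _ _ init
          (fun acc col _ => pvStepA_eq_pack acc col)]
    -- B's zipped fill state is the same column view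
    rw [pvZipEq]
    set cols := (List.range (pvWd L)).map (fun i => L.filterMap (fun l => l[i]?)) with hcols
    rw [show (cols.map (fun col => (col.getLast?, col.dropLast))).foldl pvEvalStep
          ((0 : Int), ' ', ([] : List Int)) =
        cols.foldl (fun a col => pvEvalStep a (col.getLast?, col.dropLast))
          ((0 : Int), ' ', ([] : List Int)) from List.foldl_map]
    have hinit : ((0 : Int), (0 : Int), ' ') = ((0 : Int), pvSeg ' ' [], ' ') := by
      simp [pvSeg]
    rw [hinit, pvFoldRel]
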